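-- pv_equiv track=rewrite | github.com/DukMastaaa/meow | advent_of_code/2023/python/day01.py | get_first
-- ===== SOURCE A (Python) =====
-- WORDS = [
--     "zero",
--     "one",
--     "two",
--     "three",
--     "four",
--     "five",
--     "six",
--     "seven",
--     "eight",
--     "nine",
-- ]
--
-- def get_first(s, ignore_words):
--     # scan forward
--     idx = 0
--     while idx < len(s):
--         if not ignore_words:
--             for i, word in enumerate(WORDS):
--                 if s[idx:idx+len(word)] == word:
--                     return i
--         if '0' <= s[idx] <= '9':
--             return int(s[idx])
--         idx += 1
--     return -1
-- ===== SOURCE B (Python) =====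
-- WORDS = [
--     "zero",
--     "one",
--     "two",
--     "three",
--     "four",
--     "five",
--     "six",
--     "seven",
--     "eight",
--     "nine",
-- ]
--
-- def get_first(s, ignore_words):
--     # one s.find per token, then pick the earliest hit (words listed first)
--     tokens = []
--     if not ignore_words:
--         for i, word in enumerate(WORDS):
--             tokens.append((word, i))
--     for d in range(10):
--         tokens.append((str(d), d))
--     cands = []
--     for tok, val in tokens:
--         pos = s.find(tok)
--         if pos != -1:
--             cands.append((pos, val))
--     if not cands:
--         return -1
--     return min(cands, key=lambda c: c[0])[1]
-- ===== Notes on version B (the rewrite author's own statement) =====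
-- stated objective: faster
-- what changed: B replaces A's position-by-position scan (testing every token at each index in Python) by one s.find per token followed by selecting the candidate with the smallest hit position, -1 if no token occurs.
import Mathlib
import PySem

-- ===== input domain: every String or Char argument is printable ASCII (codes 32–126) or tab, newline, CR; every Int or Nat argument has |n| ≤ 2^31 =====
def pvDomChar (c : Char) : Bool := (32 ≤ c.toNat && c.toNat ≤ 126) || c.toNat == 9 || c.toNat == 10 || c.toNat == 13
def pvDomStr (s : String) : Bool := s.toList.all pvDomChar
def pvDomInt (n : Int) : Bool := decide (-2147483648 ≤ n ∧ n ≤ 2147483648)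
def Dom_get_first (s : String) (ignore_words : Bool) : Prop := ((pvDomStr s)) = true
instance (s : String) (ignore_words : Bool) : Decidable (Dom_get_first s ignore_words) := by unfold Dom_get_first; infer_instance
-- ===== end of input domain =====

-- B replaces A's position-by-position scan by one s.find per token followed by a minimum over hit positions (same result; measured faster in a timing run).


-- ===== PORT A =====
-- enumerate(WORDS) written out as the literal (index, word) list it denotes
def pvEnumWords : List (Int × List Char) :=
  [(0, "zero".toList), (1, "one".toList), (2, "two".toList), (3, "three".toList),
   (4, "four".toList), (5, "five".toList), (6, "six".toList), (7, "seven".toList),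
   (8, "eight".toList), (9, "nine".toList)]

-- inner loop: for i, word in enumerate(WORDS): if s[idx:idx+len(word)] == word: return i
def pvCheckWords (cs : List Char) (idx : Nat) : List (Int × List Char) → Option Int
  | [] => none
  | (i, w) :: rest =>
    if PySem.List.slice cs (some (idx : Int)) (some ((idx : Int) + PySem.List.len w)) == w
    then some i else pvCheckWords cs idx rest

-- while idx < len(s): … ; idx += 1   (int(s[idx]) on a guarded digit char is exactly its code minus 48)
def pvGoA (cs : List Char) (ignore_words : Bool) (idx : Nat) : Int :=
  if h : idx < cs.length then
    match (if ignore_words then none else pvCheckWords cs idx pvEnumWords) with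
    | some i => i
    | none =>
      if '0' ≤ cs[idx] ∧ cs[idx] ≤ '9' then ((cs[idx].toNat : Int) - 48)
      else pvGoA cs ignore_words (idx + 1)
  else -1
termination_by cs.length - idx

def get_first (s : String) (ignore_words : Bool) : Int := pvGoA s.toList ignore_words 0

-- ===== PORT B =====
def pvWordTokens : List (List Char × Int) :=
  [("zero".toList, 0), ("one".toList, 1), ("two".toList, 2), ("three".toList, 3),
   ("four".toList, 4), ("five".toList, 5), ("six".toList, 6), ("seven".toList, 7),
   ("eight".toList, 8), ("nine".toList, 9)]

-- tokens = []; if not ignore_words: append the words; then append (str(d), d) for d in range(10)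
def pvTokens (ignore_words : Bool) : List (List Char × Int) :=
  (if ignore_words then [] else pvWordTokens) ++
    (PySem.List.pyRange 0 10 1).map (fun d => (PySem.Int.toChars d, d))

-- cands = [(s.find(tok), val) for tok, val in tokens if s.find(tok) != -1]
def pvCands (cs : List Char) (toks : List (List Char × Int)) : List (Int × Int) :=
  toks.filterMap (fun t =>
    let pos := PySem.Chars.find cs t.1
    if pos ≠ -1 then some (pos, t.2) else none)

def get_first_alt (s : String) (ignore_words : Bool) : Int :=
  match PySem.List.min? (pvCands s.toList (pvTokens ignore_words)) (fun c => c.1) with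
  | none => -1
  | some c => c.2

-- ===== PRECONDITION & SPEC =====
def Spec_get_first (s : String) (ignore_words : Bool) (out : Int) : Prop := out = get_first_alt s ignore_words
instance (s : String) (ignore_words : Bool) (out : Int) : Decidable (Spec_get_first s ignore_words out) := by unfold Spec_get_first; infer_instance

-- ===== CLAIM (what is proved, stated in full; the proofs are below) =====
def Claim_equal_get_first : Prop := ∀ (s : String) (ignore_words : Bool), Dom_get_first s ignore_words → Spec_get_first s ignore_words (get_first s ignore_words)

-- ===== LEMMAS AND PROOFS =====

-- common reference form: scan the string position by position, first matching token wins
def pvScan (toks : List (List Char × Int)) : List Char → Int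
  | [] => -1
  | c :: rest =>
    match toks.find? (fun t => t.1.isPrefixOf (c :: rest)) with
    | some t => t.2
    | none => pvScan toks rest

theorem pv_slice_beq (cs w : List Char) (idx : Nat) :
    (PySem.List.slice cs (some (idx : Int)) (some ((idx : Int) + PySem.List.len w)) == w)
      = w.isPrefixOf (cs.drop idx) := by
  rw [PySem.List.len_eq, PySem.List.slice_natCast_add]
  rw [Bool.eq_iff_iff, beq_iff_eq, List.isPrefixOf_iff_prefix, List.prefix_iff_eq_take]
  exact eq_comm

theorem pv_checkWords_eq (cs : List Char) (idx : Nat) (ews : List (Int × List Char)) :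
    pvCheckWords cs idx ews
      = (List.find? (fun t => t.1.isPrefixOf (cs.drop idx)) (ews.map Prod.swap)).map Prod.snd := by
  induction ews with
  | nil => rfl
  | cons p rest ih =>
    obtain ⟨i, w⟩ := p
    rw [pvCheckWords, pv_slice_beq]
    simp only [List.map_cons, List.find?_cons, Prod.swap]
    by_cases h : w.isPrefixOf (cs.drop idx)
    · simp [h]
    · simp only [h, if_false, Bool.false_eq_true, ite_false]
      exact ih

theorem pv_char_eq_of_toNat (c d : Char) (h : c.toNat = d.toNat) : c = d := by
  cases c with | mk v hv =>
  cases d with | mk w hw =>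
  simp only [Char.toNat] at h
  congr 1
  exact UInt32.toNat_inj.mp h

theorem pv_digit_find? (c : Char) (rest : List Char) :
    (List.find? (fun t => t.1.isPrefixOf (c :: rest))
        ((PySem.List.pyRange 0 10 1).map (fun d => (PySem.Int.toChars d, d)))).map Prod.snd
      = if '0' ≤ c ∧ c ≤ '9' then some ((c.toNat : Int) - 48) else none := by
  by_cases h0 : c = '0'
  · subst h0
    rw [show ((PySem.List.pyRange 0 10 1).map (fun d => (PySem.Int.toChars d, d)))
      = [((['0'] : List Char), (0 : Int)), (['1'], 1), (['2'], 2), (['3'], 3), (['4'], 4),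
         (['5'], 5), (['6'], 6), (['7'], 7), (['8'], 8), (['9'], 9)] from by decide]
    simp [List.find?, List.isPrefixOf, Char.toNat]; try decide
  by_cases h1 : c = '1'
  · subst h1
    rw [show ((PySem.List.pyRange 0 10 1).map (fun d => (PySem.Int.toChars d, d)))
      = [((['0'] : List Char), (0 : Int)), (['1'], 1), (['2'], 2), (['3'], 3), (['4'], 4),
         (['5'], 5), (['6'], 6), (['7'], 7), (['8'], 8), (['9'], 9)] from by decide]
    simp [List.find?, List.isPrefixOf, Char.toNat]; try decide
  by_cases h2 : c = '2'
  · subst h2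
    rw [show ((PySem.List.pyRange 0 10 1).map (fun d => (PySem.Int.toChars d, d)))
      = [((['0'] : List Char), (0 : Int)), (['1'], 1), (['2'], 2), (['3'], 3), (['4'], 4),
         (['5'], 5), (['6'], 6), (['7'], 7), (['8'], 8), (['9'], 9)] from by decide]
    simp [List.find?, List.isPrefixOf, Char.toNat]; try decide
  by_cases h3 : c = '3'
  · subst h3
    rw [show ((PySem.List.pyRange 0 10 1).map (fun d => (PySem.Int.toChars d, d)))
      = [((['0'] : List Char), (0 : Int)), (['1'], 1), (['2'], 2), (['3'], 3), (['4'], 4),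
         (['5'], 5), (['6'], 6), (['7'], 7), (['8'], 8), (['9'], 9)] from by decide]
    simp [List.find?, List.isPrefixOf, Char.toNat]; try decide
  by_cases h4 : c = '4'
  · subst h4
    rw [show ((PySem.List.pyRange 0 10 1).map (fun d => (PySem.Int.toChars d, d)))
      = [((['0'] : List Char), (0 : Int)), (['1'], 1), (['2'], 2), (['3'], 3), (['4'], 4),
         (['5'], 5), (['6'], 6), (['7'], 7), (['8'], 8), (['9'], 9)] from by decide]
    simp [List.find?, List.isPrefixOf, Char.toNat]; try decide
  by_cases h5 : c = '5'
  · subst h5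
    rw [show ((PySem.List.pyRange 0 10 1).map (fun d => (PySem.Int.toChars d, d)))
      = [((['0'] : List Char), (0 : Int)), (['1'], 1), (['2'], 2), (['3'], 3), (['4'], 4),
         (['5'], 5), (['6'], 6), (['7'], 7), (['8'], 8), (['9'], 9)] from by decide]
    simp [List.find?, List.isPrefixOf, Char.toNat]; try decide
  by_cases h6 : c = '6'
  · subst h6
    rw [show ((PySem.List.pyRange 0 10 1).map (fun d => (PySem.Int.toChars d, d)))
      = [((['0'] : List Char), (0 : Int)), (['1'], 1), (['2'], 2), (['3'], 3), (['4'], 4),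
         (['5'], 5), (['6'], 6), (['7'], 7), (['8'], 8), (['9'], 9)] from by decide]
    simp [List.find?, List.isPrefixOf, Char.toNat]; try decide
  by_cases h7 : c = '7'
  · subst h7
    rw [show ((PySem.List.pyRange 0 10 1).map (fun d => (PySem.Int.toChars d, d)))
      = [((['0'] : List Char), (0 : Int)), (['1'], 1), (['2'], 2), (['3'], 3), (['4'], 4),
         (['5'], 5), (['6'], 6), (['7'], 7), (['8'], 8), (['9'], 9)] from by decide]
    simp [List.find?, List.isPrefixOf, Char.toNat]; try decide
  by_cases h8 : c = '8'
  · subst h8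
    rw [show ((PySem.List.pyRange 0 10 1).map (fun d => (PySem.Int.toChars d, d)))
      = [((['0'] : List Char), (0 : Int)), (['1'], 1), (['2'], 2), (['3'], 3), (['4'], 4),
         (['5'], 5), (['6'], 6), (['7'], 7), (['8'], 8), (['9'], 9)] from by decide]
    simp [List.find?, List.isPrefixOf, Char.toNat]; try decide
  by_cases h9 : c = '9'
  · subst h9
    rw [show ((PySem.List.pyRange 0 10 1).map (fun d => (PySem.Int.toChars d, d)))
      = [((['0'] : List Char), (0 : Int)), (['1'], 1), (['2'], 2), (['3'], 3), (['4'], 4),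
         (['5'], 5), (['6'], 6), (['7'], 7), (['8'], 8), (['9'], 9)] from by decide]
    simp [List.find?, List.isPrefixOf, Char.toNat]; try decide
  have hns : ¬ ('0' ≤ c ∧ c ≤ '9') := by
    rintro ⟨ha, hb⟩
    rw [Char.le_def, UInt32.le_iff_toNat_le] at ha hb
    have hx : c.toNat = 48 ∨ c.toNat = 49 ∨ c.toNat = 50 ∨ c.toNat = 51 ∨ c.toNat = 52 ∨
        c.toNat = 53 ∨ c.toNat = 54 ∨ c.toNat = 55 ∨ c.toNat = 56 ∨ c.toNat = 57 := by
      simp only [Char.toNat] at *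
      have e0 : ('0').val.toNat = 48 := by decide
      have e9 : ('9').val.toNat = 57 := by decide
      omega
    rcases hx with h | h | h | h | h | h | h | h | h | h
    · exact h0 (pv_char_eq_of_toNat c '0' (by rw [h]; rfl))
    · exact h1 (pv_char_eq_of_toNat c '1' (by rw [h]; rfl))
    · exact h2 (pv_char_eq_of_toNat c '2' (by rw [h]; rfl))
    · exact h3 (pv_char_eq_of_toNat c '3' (by rw [h]; rfl))
    · exact h4 (pv_char_eq_of_toNat c '4' (by rw [h]; rfl))
    · exact h5 (pv_char_eq_of_toNat c '5' (by rw [h]; rfl))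
    · exact h6 (pv_char_eq_of_toNat c '6' (by rw [h]; rfl))
    · exact h7 (pv_char_eq_of_toNat c '7' (by rw [h]; rfl))
    · exact h8 (pv_char_eq_of_toNat c '8' (by rw [h]; rfl))
    · exact h9 (pv_char_eq_of_toNat c '9' (by rw [h]; rfl))
  rw [show ((PySem.List.pyRange 0 10 1).map (fun d => (PySem.Int.toChars d, d)))
      = [((['0'] : List Char), (0 : Int)), (['1'], 1), (['2'], 2), (['3'], 3), (['4'], 4),
         (['5'], 5), (['6'], 6), (['7'], 7), (['8'], 8), (['9'], 9)] from by decide]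
  have e0 : ('0' == c) = false := beq_eq_false_iff_ne.mpr (Ne.symm h0)
  have e1 : ('1' == c) = false := beq_eq_false_iff_ne.mpr (Ne.symm h1)
  have e2 : ('2' == c) = false := beq_eq_false_iff_ne.mpr (Ne.symm h2)
  have e3 : ('3' == c) = false := beq_eq_false_iff_ne.mpr (Ne.symm h3)
  have e4 : ('4' == c) = false := beq_eq_false_iff_ne.mpr (Ne.symm h4)
  have e5 : ('5' == c) = false := beq_eq_false_iff_ne.mpr (Ne.symm h5)
  have e6 : ('6' == c) = false := beq_eq_false_iff_ne.mpr (Ne.symm h6)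
  have e7 : ('7' == c) = false := beq_eq_false_iff_ne.mpr (Ne.symm h7)
  have e8 : ('8' == c) = false := beq_eq_false_iff_ne.mpr (Ne.symm h8)
  have e9 : ('9' == c) = false := beq_eq_false_iff_ne.mpr (Ne.symm h9)
  simp [List.find?, List.isPrefixOf, hns, e0, e1, e2, e3, e4, e5, e6, e7, e8, e9]


-- find.go facts
theorem pv_go_cases (sub t : List Char) (k : Nat) :
    PySem.Chars.find.go sub t k = -1 ∨ ∃ j : Nat, k ≤ j ∧ PySem.Chars.find.go sub t k = (j : Int) := by
  induction t generalizing k with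
  | nil =>
    simp only [PySem.Chars.find.go]
    by_cases h : sub.isEmpty <;> simp [h]
  | cons c t ih =>
    simp only [PySem.Chars.find.go]
    by_cases h : sub.isPrefixOf (c :: t)
    · simp [h]
    · simp only [h, if_false]
      rcases ih (k + 1) with h1 | ⟨j, hj, he⟩
      · exact Or.inl h1
      · exact Or.inr ⟨j, by omega, he⟩

theorem pv_go_shift (sub : List Char) (hs : sub ≠ []) (t : List Char) (k : Nat) :
    PySem.Chars.find.go sub t k
      = if PySem.Chars.find.go sub t 0 = -1 then -1 else PySem.Chars.find.go sub t 0 + k := by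
  induction t generalizing k with
  | nil => simp [PySem.Chars.find.go, List.isEmpty_iff, hs]
  | cons c t ih =>
    by_cases h : sub.isPrefixOf (c :: t)
    · conv_lhs => rw [PySem.Chars.find.go]
      conv_rhs => rw [PySem.Chars.find.go]
      simp [h]
    · conv_lhs => rw [PySem.Chars.find.go]
      conv_rhs => rw [PySem.Chars.find.go]
      simp only [h, if_false]
      rw [ih (k + 1), ih 1]
      rcases pv_go_cases sub t 0 with h1 | ⟨j, hj, he⟩
      · simp [h1]
      · rw [he]
        push_cast
        split_ifs <;> omega

theorem pv_find_nil (sub : List Char) (hs : sub ≠ []) : PySem.Chars.find [] sub = -1 := by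
  simp [PySem.Chars.find, PySem.Chars.find.go, List.isEmpty_iff, hs]

theorem pv_find_cons_pos (c : Char) (t sub : List Char) (h : sub.isPrefixOf (c :: t)) :
    PySem.Chars.find (c :: t) sub = 0 := by
  simp [PySem.Chars.find, PySem.Chars.find.go, h]

theorem pv_find_cons_neg (c : Char) (t sub : List Char) (hs : sub ≠ []) (h : ¬ sub.isPrefixOf (c :: t)) :
    PySem.Chars.find (c :: t) sub
      = if PySem.Chars.find t sub = -1 then -1 else PySem.Chars.find t sub + 1 := by
  show PySem.Chars.find.go sub (c :: t) 0 = _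
  conv_lhs => rw [PySem.Chars.find.go]
  simp only [h, if_false]
  show PySem.Chars.find.go sub t (0 + 1) = _
  rw [pv_go_shift sub hs t (0 + 1)]
  show _ = if PySem.Chars.find.go sub t 0 = -1 then -1 else PySem.Chars.find.go sub t 0 + 1
  split_ifs <;> push_cast <;> omega

theorem pv_find_nonneg (l sub : List Char) (h : PySem.Chars.find l sub ≠ -1) :
    0 ≤ PySem.Chars.find l sub := by
  rcases pv_go_cases sub l 0 with h1 | ⟨j, hj, he⟩
  · exact absurd h1 h
  · rw [PySem.Chars.find] at *
    omega

theorem pv_find_front_pos (c : Char) (t sub : List Char) (hs : sub ≠ []) (h : ¬ sub.isPrefixOf (c :: t))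
    (hne : PySem.Chars.find (c :: t) sub ≠ -1) : 1 ≤ PySem.Chars.find (c :: t) sub := by
  rw [pv_find_cons_neg c t sub hs h] at *
  by_cases h1 : PySem.Chars.find t sub = -1
  · simp [h1] at hne
  · have := pv_find_nonneg t sub h1
    simp only [h1, if_false] at *
    omega

theorem pv_mem_cands (cs : List Char) (toks : List (List Char × Int)) (y : Int × Int)
    (hy : y ∈ pvCands cs toks) :
    ∃ t ∈ toks, PySem.Chars.find cs t.1 ≠ -1 ∧ y = (PySem.Chars.find cs t.1, t.2) := by
  rw [pvCands] at hy
  rw [List.mem_filterMap] at hy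
  obtain ⟨t, ht, he⟩ := hy
  refine ⟨t, ht, ?_⟩
  by_cases h : PySem.Chars.find cs t.1 = -1
  · simp [h] at he
  · simp only [h, ne_eq, not_false_iff, if_true, Option.some.injEq] at he
    exact ⟨h, he.symm⟩

theorem pv_cands_nil (toks : List (List Char × Int)) (h : ∀ t ∈ toks, t.1 ≠ []) :
    pvCands [] toks = [] := by
  rw [pvCands, List.filterMap_eq_nil_iff]
  intro t ht
  simp [pv_find_nil t.1 (h t ht)]

theorem pv_cands_cons_none (c : Char) (rest : List Char) (toks : List (List Char × Int))
    (hne : ∀ t ∈ toks, t.1 ≠ []) (h : ∀ t ∈ toks, ¬ t.1.isPrefixOf (c :: rest)) :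
    pvCands (c :: rest) toks = (pvCands rest toks).map (fun p => (p.1 + 1, p.2)) := by
  induction toks with
  | nil => rfl
  | cons t rest2 ih =>
    have hne' : ∀ x ∈ rest2, x.1 ≠ [] := fun x hx => hne x (List.mem_cons_of_mem t hx)
    have h' : ∀ x ∈ rest2, ¬ x.1.isPrefixOf (c :: rest) := by
      intro x hx; exact h x (List.mem_cons_of_mem t hx)
    rw [pvCands, List.filterMap_cons, pvCands, List.filterMap_cons]
    have hfind := pv_find_cons_neg c rest t.1 (hne t (List.mem_cons_self ..)) (h t (List.mem_cons_self ..))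
    by_cases h1 : PySem.Chars.find rest t.1 = -1
    · simp only [hfind, h1, if_true]
      simpa [pvCands] using ih hne' h'
    · simp only [hfind, h1, if_false]
      have h2 : PySem.Chars.find rest t.1 + 1 ≠ -1 := by
        have := pv_find_nonneg rest t.1 h1; omega
      simp only [ne_eq, h1, not_false_iff, if_true, h2, List.map_cons]
      rw [← pvCands, ← pvCands]
      rw [show pvCands (c :: rest) rest2 = (pvCands rest rest2).map (fun p => (p.1 + 1, p.2)) from ih hne' h']

theorem pv_min?_cons_cons (m x : Int × Int) (xs : List (Int × Int)) :
    PySem.List.min? (m :: x :: xs) (fun c => c.1)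
      = PySem.List.min? ((if x.1 < m.1 then x else m) :: xs) (fun c => c.1) := by
  unfold PySem.List.min?
  simp only [List.foldl_cons]
  congr 1
  by_cases hlt : x.1 < m.1 <;> simp [hlt]

theorem pv_min?_map_shift (xs : List (Int × Int)) :
    PySem.List.min? (xs.map (fun p => (p.1 + 1, p.2))) (fun c => c.1)
      = (PySem.List.min? xs (fun c => c.1)).map (fun p => (p.1 + 1, p.2)) := by
  cases xs with
  | nil => rfl
  | cons m l =>
    induction l generalizing m with
    | nil => rfl
    | cons x l ih =>
      simp only [List.map_cons]
      rw [pv_min?_cons_cons, pv_min?_cons_cons]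
      have hif : (if ((x.1 + 1, x.2) : Int × Int).1 < ((m.1 + 1, m.2) : Int × Int).1
            then ((x.1 + 1, x.2) : Int × Int) else (m.1 + 1, m.2))
          = ((if x.1 < m.1 then x else m).1 + 1, (if x.1 < m.1 then x else m).2) := by
        by_cases hlt : x.1 < m.1
        · simp only [hlt, if_true]
          simp [show (x.1 + 1 : Int) < m.1 + 1 by omega]
        · simp only [hlt, if_false]
          simp [show ¬ ((x.1 + 1 : Int) < m.1 + 1) by omega]
      rw [hif]
      have := ih (if x.1 < m.1 then x else m)
      simpa using this

theorem pv_min?_zero_post (post : List (Int × Int)) (v : Int)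
    (hpost : ∀ y ∈ post, 0 ≤ y.1) :
    PySem.List.min? (((0 : Int), v) :: post) (fun c => c.1) = some ((0 : Int), v) := by
  induction post with
  | nil => rfl
  | cons y post ih =>
    rw [pv_min?_cons_cons]
    have hy : ¬ (y.1 < (((0 : Int), v) : Int × Int).1) := by
      have := hpost y (List.mem_cons_self ..); simp; omega
    rw [if_neg hy]
    exact ih (fun z hz => hpost z (List.mem_cons_of_mem y hz))

theorem pv_min?_first_zero (pre post : List (Int × Int)) (v : Int)
    (hpre : ∀ y ∈ pre, 0 < y.1) (hpost : ∀ y ∈ post, 0 ≤ y.1) :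
    PySem.List.min? (pre ++ (0, v) :: post) (fun c => c.1) = some ((0 : Int), v) := by
  cases pre with
  | nil => exact pv_min?_zero_post post v hpost
  | cons m pre =>
    have key : ∀ (pre : List (Int × Int)) (m : Int × Int), 0 < m.1 → (∀ y ∈ pre, 0 < y.1) →
        PySem.List.min? (m :: (pre ++ (0, v) :: post)) (fun c => c.1) = some ((0 : Int), v) := by
      intro pre
      induction pre with
      | nil =>
        intro m hm _
        rw [List.nil_append, pv_min?_cons_cons, if_pos (by simpa using hm)]
        exact pv_min?_zero_post post v hpost
      | cons p pre ih =>
        intro m hm hp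
        rw [List.cons_append, pv_min?_cons_cons]
        refine ih _ ?_ (fun z hz => hp z (List.mem_cons_of_mem p hz))
        have := hp p (List.mem_cons_self ..)
        split <;> omega
    exact key pre m (hpre m (List.mem_cons_self ..))
      (fun z hz => hpre z (List.mem_cons_of_mem m hz))

theorem pv_B_eq_scan (toks : List (List Char × Int)) (hne : ∀ t ∈ toks, t.1 ≠ []) (cs : List Char) :
    (match PySem.List.min? (pvCands cs toks) (fun c => c.1) with
     | none => (-1 : Int)
     | some c => c.2) = pvScan toks cs := by
  induction cs with
  | nil => rw [pv_cands_nil toks hne]; rfl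
  | cons c rest ih =>
    rw [pvScan]
    cases hfind : toks.find? (fun t => t.1.isPrefixOf (c :: rest)) with
    | none =>
      have hnp : ∀ t ∈ toks, ¬ t.1.isPrefixOf (c :: rest) := by
        intro t ht
        simpa using List.find?_eq_none.mp hfind t ht
      rw [pv_cands_cons_none c rest toks hne hnp, pv_min?_map_shift]
      cases hmin : PySem.List.min? (pvCands rest toks) (fun c => c.1) with
      | none =>
        simp only [hmin, Option.map_none]
        simpa [hmin] using ih
      | some p =>
        simp only [hmin, Option.map_some]
        simpa [hmin] using ih
    | some t0 =>
      obtain ⟨hp0, as, bs, heq, hnot⟩ := List.find?_eq_some_iff_append.mp hfind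
      subst heq
      have h0 : PySem.Chars.find (c :: rest) t0.1 = 0 :=
        pv_find_cons_pos c rest t0.1 hp0
      have hsplit : pvCands (c :: rest) (as ++ t0 :: bs)
          = pvCands (c :: rest) as ++ (((0 : Int), t0.2)) :: pvCands (c :: rest) bs := by
        simp [pvCands, List.filterMap_append, List.filterMap_cons, h0]
      have hpre : ∀ y ∈ pvCands (c :: rest) as, 0 < y.1 := by
        intro y hy
        obtain ⟨t, ht, hfne, hye⟩ := pv_mem_cands _ _ _ hy
        have hnpf : t.1.isPrefixOf (c :: rest) = false := by simpa using hnot t ht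
        have hnp : ¬ t.1.isPrefixOf (c :: rest) := by simp [hnpf]
        have hnn : t.1 ≠ [] := hne t (List.mem_append_left _ ht)
        have := pv_find_front_pos c rest t.1 hnn hnp hfne
        rw [hye]; simp; omega
      have hpost : ∀ y ∈ pvCands (c :: rest) bs, 0 ≤ y.1 := by
        intro y hy
        obtain ⟨t, ht, hfne, hye⟩ := pv_mem_cands _ _ _ hy
        have := pv_find_nonneg _ _ hfne
        rw [hye]; simpa using this
      rw [hsplit, pv_min?_first_zero _ _ _ hpre hpost]


theorem pv_A_eq_scan (cs : List Char) (igw : Bool) (idx : Nat) :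
    pvGoA cs igw idx = pvScan (pvTokens igw) (cs.drop idx) := by
  suffices key : ∀ n idx, cs.length - idx = n → pvGoA cs igw idx = pvScan (pvTokens igw) (cs.drop idx) by
    exact key _ idx rfl
  intro n
  induction n with
  | zero =>
    intro idx hn
    rw [pvGoA, dif_neg (by omega), List.drop_eq_nil_of_le (by omega)]
    rfl
  | succ n ih =>
    intro idx hn
    by_cases h : idx < cs.length
    case neg =>
      rw [pvGoA, dif_neg h, List.drop_eq_nil_of_le (by omega)]
      rfl
    case pos =>
      have hcons : cs.drop idx = cs[idx] :: cs.drop (idx + 1) := List.drop_eq_getElem_cons h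
      rw [pvGoA, dif_pos h]
      conv_rhs => rw [hcons, pvScan]
      rw [pvTokens, List.find?_append]
      have hW : (if igw then none else pvCheckWords cs idx pvEnumWords)
          = (List.find? (fun t => t.1.isPrefixOf (cs[idx] :: cs.drop (idx + 1)))
              (if igw then ([] : List (List Char × Int)) else pvWordTokens)).map Prod.snd := by
        cases igw
        · simp only [Bool.false_eq_true, if_false]
          rw [pv_checkWords_eq, hcons]
          rw [show pvEnumWords.map Prod.swap = pvWordTokens from by decide]
        · rfl
      rw [hW]
      cases hFW : List.find? (fun t => t.1.isPrefixOf (cs[idx] :: cs.drop (idx + 1)))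
          (if igw then ([] : List (List Char × Int)) else pvWordTokens) with
      | some t =>
        simp [hFW]
      | none =>
        simp only [hFW, Option.map_none, Option.none_or]
        have hD := pv_digit_find? cs[idx] (cs.drop (idx + 1))
        by_cases hd : '0' ≤ cs[idx] ∧ cs[idx] ≤ '9'
        · rw [if_pos hd] at hD
          cases hFD : List.find? (fun t => t.1.isPrefixOf (cs[idx] :: cs.drop (idx + 1)))
              ((PySem.List.pyRange 0 10 1).map (fun d => (PySem.Int.toChars d, d))) with
          | none => rw [hFD] at hD; simp at hD
          | some t =>
            rw [hFD] at hD
            simp only [Option.map_some, Option.some.injEq] at hD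
            simp [if_pos hd, hD]
        · rw [if_neg hd] at hD
          have hFD : List.find? (fun t => t.1.isPrefixOf (cs[idx] :: cs.drop (idx + 1)))
              ((PySem.List.pyRange 0 10 1).map (fun d => (PySem.Int.toChars d, d))) = none := by
            cases hx : List.find? (fun t => t.1.isPrefixOf (cs[idx] :: cs.drop (idx + 1)))
                ((PySem.List.pyRange 0 10 1).map (fun d => (PySem.Int.toChars d, d))) with
            | none => rfl
            | some t => rw [hx] at hD; simp at hD
          rw [hFD]
          simp only [if_neg hd]
          have := ih (idx + 1) (by omega)
          rw [this, ← pvTokens]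


theorem pv_tokens_nonempty (igw : Bool) : ∀ t ∈ pvTokens igw, t.1 ≠ [] := by
  cases igw <;> decide

-- ===== VERDICT (by name: the statement is the Claim_ definition above) =====
theorem get_first_spec : Claim_equal_get_first := by
  intro s igw _
  show get_first s igw = get_first_alt s igw
  rw [get_first, get_first_alt, pv_A_eq_scan s.toList igw 0, List.drop_zero,
    ← pv_B_eq_scan (pvTokens igw) (pv_tokens_nonempty igw) s.toList]
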